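-- pv_equiv track=rewrite | github.com/cazares/alvernia-reader | scripts/sync_breaker_campaign.py | _extract_error_line
-- ===== SOURCE A (Python) =====
-- def _extract_error_line(log_text: str) -> str:
--     lines = [line.strip() for line in str(log_text or "").splitlines() if line.strip()]
--     if not lines:
--         return ""
--     for line in reversed(lines):
--         if "RuntimeError:" in line:
--             return line.split("RuntimeError:", 1)[1].strip()
--     for line in reversed(lines):
--         if "[ERROR]" in line:
--             idx = line.find("[ERROR]")
--             return line[idx + len("[ERROR]") :].strip()
--     return lines[-1]
-- ===== SOURCE B (Python) =====
-- def _extract_error_line(log_text: str) -> str: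
--     last_line = last_rt = last_err = None
--     for raw in str(log_text or "").splitlines():
--         line = raw.strip()
--         if not line:
--             continue
--         last_line = line
--         if "RuntimeError:" in line:
--             last_rt = line
--         if "[ERROR]" in line:
--             last_err = line
--     if last_line is None:
--         return ""
--     if last_rt is not None:
--         return last_rt.split("RuntimeError:", 1)[1].strip()
--     if last_err is not None:
--         return last_err[last_err.find("[ERROR]") + len("[ERROR]"):].strip()
--     return last_line
-- ===== Notes on version B (the rewrite author's own statement) =====
-- stated objective: alternative
-- what changed: Replaces A's build-a-stripped-list-then-two-reversed-scans with a single FORWARD pass over the raw lines that keeps three accumulators (last non-empty line, last RuntimeError line, last [ERROR] line) and extracts the suffix once after the loop.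
import Mathlib
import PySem

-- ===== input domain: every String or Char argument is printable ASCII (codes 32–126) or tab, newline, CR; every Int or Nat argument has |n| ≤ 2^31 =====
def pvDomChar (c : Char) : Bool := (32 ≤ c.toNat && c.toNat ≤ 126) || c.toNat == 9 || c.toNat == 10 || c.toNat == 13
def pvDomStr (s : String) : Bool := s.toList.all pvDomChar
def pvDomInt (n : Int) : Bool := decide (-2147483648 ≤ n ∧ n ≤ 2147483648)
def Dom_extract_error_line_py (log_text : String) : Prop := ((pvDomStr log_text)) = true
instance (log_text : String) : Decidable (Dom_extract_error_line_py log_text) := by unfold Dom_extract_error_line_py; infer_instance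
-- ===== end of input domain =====

-- B replaces A's stripped-list build plus two reversed scans by one forward pass with
-- three accumulators (last non-empty / last RuntimeError / last [ERROR] line); same value.

-- ===== PORT A =====
-- first reversed loop of A: return the RuntimeError suffix of the first matching line
def pvA_runtime : List String → Option String
  | [] => none
  | l :: rest =>
    if PySem.Str.isIn "RuntimeError:" l then
      some (PySem.Str.strip (((PySem.Str.splitMax? l "RuntimeError:" 1).getD []).getD 1 ""))
    else pvA_runtime rest

-- second reversed loop of A: return the [ERROR] suffix of the first matching line
def pvA_error : List String → Option String
  | [] => none
  | l :: rest =>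
    if PySem.Str.isIn "[ERROR]" l then
      some (PySem.Str.strip (PySem.Str.slice l (some (PySem.Str.find l "[ERROR]" + 7)) none))
    else pvA_error rest

def extract_error_line_py (log_text : String) : String :=
  let lines := (PySem.Str.splitlines log_text).filterMap
    (fun line => let s := PySem.Str.strip line; if s = "" then none else some s)
  if lines = [] then ""
  else
    match pvA_runtime lines.reverse with
    | some r => r
    | none =>
      match pvA_error lines.reverse with
      | some r => r
      | none => lines.getLast?.getD ""   -- lines[-1], guarded by lines ≠ []

-- ===== PORT B =====
-- B's forward-pass step: state = (last_line, last_rt, last_err), overwritten on each match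
def pvB_step (st : Option String × Option String × Option String) (raw : String) :
    Option String × Option String × Option String :=
  let line := PySem.Str.strip raw
  if line = "" then st
  else
    (some line,
     (if PySem.Str.isIn "RuntimeError:" line then some line else st.2.1),
     (if PySem.Str.isIn "[ERROR]" line then some line else st.2.2))

def extract_error_line_py_alt (log_text : String) : String :=
  let st := (PySem.Str.splitlines log_text).foldl pvB_step (none, none, none)
  match st.1 with
  | none => ""
  | some last_line =>
    match st.2.1 with
    | some rt => PySem.Str.strip (((PySem.Str.splitMax? rt "RuntimeError:" 1).getD []).getD 1 "")
    | none =>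
      match st.2.2 with
      | some err => PySem.Str.strip (PySem.Str.slice err (some (PySem.Str.find err "[ERROR]" + 7)) none)
      | none => last_line

-- ===== PRECONDITION & SPEC =====
def Spec_extract_error_line_py (log_text : String) (out : String) : Prop := out = extract_error_line_py_alt log_text
instance (log_text : String) (out : String) : Decidable (Spec_extract_error_line_py log_text out) := by unfold Spec_extract_error_line_py; infer_instance

-- ===== CLAIM (what is proved, stated in full; the proofs are below) =====
def Claim_equal_extract_error_line_py : Prop := ∀ (log_text : String), Dom_extract_error_line_py log_text → Spec_extract_error_line_py log_text (extract_error_line_py log_text)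

-- ===== LEMMAS AND PROOFS =====

def pvStripF (line : String) : Option String :=
  let s := PySem.Str.strip line; if s = "" then none else some s

theorem pv_getLast?_cons_or {a : String} {l : List String} :
    (a :: l).getLast? = l.getLast?.or (some a) := by
  cases l with
  | nil => rfl
  | cons b t =>
    rw [List.getLast?_cons_cons]
    cases hx : (b :: t).getLast? with
    | some y => rfl
    | none => exact absurd (List.getLast?_eq_none_iff.mp hx) (by simp)

-- the forward fold's three accumulators, characterised over the stripped non-empty lines
theorem pvB_fold_char (raws : List String) : ∀ st,
    raws.foldl pvB_step st =
      (let lines := raws.filterMap pvStripF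
       ((lines.getLast?).or st.1,
        (lines.reverse.find? (fun l => PySem.Str.isIn "RuntimeError:" l)).or st.2.1,
        (lines.reverse.find? (fun l => PySem.Str.isIn "[ERROR]" l)).or st.2.2)) := by
  induction raws with
  | nil => intro st; simp
  | cons raw rest ih =>
    intro st
    simp only [List.foldl_cons, ih]
    by_cases h : PySem.Str.strip raw = ""
    · have hf : pvStripF raw = none := by simp [pvStripF, h]
      simp only [List.filterMap_cons, hf, pvB_step, h, if_pos]
    · have hf : pvStripF raw = some (PySem.Str.strip raw) := by simp [pvStripF, h]
      simp only [List.filterMap_cons, hf, pvB_step]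
      rw [if_neg h]
      refine Prod.ext ?_ (Prod.ext ?_ ?_)
      · show _ = ((PySem.Str.strip raw :: rest.filterMap pvStripF).getLast?).or st.1
        rw [pv_getLast?_cons_or, Option.or_assoc, Option.some_or]
      · show _ = ((List.find? _ (PySem.Str.strip raw :: rest.filterMap pvStripF).reverse).or st.2.1)
        rw [List.reverse_cons, List.find?_append, Option.or_assoc, List.find?_cons]
        cases h2 : PySem.Str.isIn "RuntimeError:" (PySem.Str.strip raw) <;> simp
      · show _ = ((List.find? _ (PySem.Str.strip raw :: rest.filterMap pvStripF).reverse).or st.2.2)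
        rw [List.reverse_cons, List.find?_append, Option.or_assoc, List.find?_cons]
        cases h2 : PySem.Str.isIn "[ERROR]" (PySem.Str.strip raw) <;> simp

theorem pvA_runtime_find (ls : List String) :
    pvA_runtime ls = (ls.find? (fun l => PySem.Str.isIn "RuntimeError:" l)).map
      (fun l => PySem.Str.strip (((PySem.Str.splitMax? l "RuntimeError:" 1).getD []).getD 1 "")) := by
  induction ls with
  | nil => rfl
  | cons l rest ih =>
    rw [List.find?_cons]
    cases h : PySem.Str.isIn "RuntimeError:" l <;>
      simp only [pvA_runtime, h, if_pos, if_neg, Bool.false_eq_true, not_false_iff, ih,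
        Option.map_some]

theorem pvA_error_find (ls : List String) :
    pvA_error ls = (ls.find? (fun l => PySem.Str.isIn "[ERROR]" l)).map
      (fun l => PySem.Str.strip (PySem.Str.slice l (some (PySem.Str.find l "[ERROR]" + 7)) none)) := by
  induction ls with
  | nil => rfl
  | cons l rest ih =>
    rw [List.find?_cons]
    cases h : PySem.Str.isIn "[ERROR]" l <;>
      simp only [pvA_error, h, if_pos, if_neg, Bool.false_eq_true, not_false_iff, ih,
        Option.map_some]

-- ===== VERDICT (by name: the statement is the Claim_ definition above) =====
theorem extract_error_line_py_spec : Claim_equal_extract_error_line_py := by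
  intro log_text _
  unfold Spec_extract_error_line_py extract_error_line_py extract_error_line_py_alt
  have hsf : (fun line => let s := PySem.Str.strip line; if s = "" then none else some s)
      = pvStripF := rfl
  simp only [hsf, pvB_fold_char, pvA_runtime_find, pvA_error_find]
  set lines := (PySem.Str.splitlines log_text).filterMap pvStripF with hl
  by_cases hnil : lines = []
  · simp [hnil]
  · simp only [if_neg hnil, Option.or_none]
    have hlast : ∃ y, lines.getLast? = some y := by
      cases hx : lines.getLast? with
      | some y => exact ⟨y, rfl⟩
      | none => exact absurd (List.getLast?_eq_none_iff.mp hx) hnil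
    obtain ⟨y, hy⟩ := hlast
    rw [hy]
    cases lines.reverse.find? (fun l => PySem.Str.isIn "RuntimeError:" l) <;>
      cases lines.reverse.find? (fun l => PySem.Str.isIn "[ERROR]" l) <;> simp
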